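-- pv_equiv track=rewrite | github.com/Change19961103/AILP | code/src/carneades/Reader.py | has_constant
-- ===== SOURCE A (Python) =====
-- def has_constant(str):
--     """
--     to check whether this string has constant
--     :return:
--     """
--     index_quota1 = [index for (index, quota) in enumerate(str) if quota == '"']
--     if len(index_quota1) == 2 and index_quota1[1] - index_quota1[0] != 1:
--         return 2
--     elif len(index_quota1) == 4 and index_quota1[1] - index_quota1[0] != 1 and index_quota1[3] - index_quota1[2] != 1:
--         return 4
--     else:
--         return 0
-- ===== SOURCE B (Python) =====
-- def has_constant(str):
--     """
--     to check whether this string has constant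
--     :return:
--     """
--     parts = str.split('"')
--     if len(parts) == 3:
--         return 2 if parts[1] else 0
--     if len(parts) == 5:
--         return 4 if parts[1] and parts[3] else 0
--     return 0
-- ===== Notes on version B (the rewrite author's own statement) =====
-- stated objective: simpler
-- what changed: B tokenizes the input at quote characters with str.split and branches on the number of parts, testing emptiness of the in-between parts, instead of collecting quote indices via an enumerate comprehension and comparing index differences.
import Mathlib
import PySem

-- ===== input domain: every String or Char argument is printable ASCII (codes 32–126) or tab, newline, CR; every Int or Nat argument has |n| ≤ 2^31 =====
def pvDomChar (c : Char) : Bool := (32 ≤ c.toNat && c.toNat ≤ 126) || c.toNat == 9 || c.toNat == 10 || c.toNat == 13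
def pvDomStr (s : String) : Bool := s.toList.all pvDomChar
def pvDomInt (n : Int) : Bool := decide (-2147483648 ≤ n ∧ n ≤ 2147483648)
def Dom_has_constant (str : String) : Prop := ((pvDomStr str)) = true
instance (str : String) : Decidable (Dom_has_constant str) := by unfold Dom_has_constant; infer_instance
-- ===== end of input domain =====

-- B tokenizes with str.split('"') and branches on the number of parts instead of
-- collecting quote indices with enumerate and comparing index differences (objective: simpler).

-- ===== PORT A =====
def has_constant (str : String) : Int :=
  let index_quota1 : List Int :=
    ((PySem.List.enumerate str.toList).filter (fun p => p.2 == '"')).map (fun p => p.1)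
  -- Python indexes index_quota1[0],[1],[2],[3] only after the length test succeeded,
  -- so the pyGetD defaults are never used
  if index_quota1.length = 2 ∧
      PySem.List.pyGetD index_quota1 1 0 - PySem.List.pyGetD index_quota1 0 0 ≠ 1 then 2
  else if index_quota1.length = 4 ∧
      PySem.List.pyGetD index_quota1 1 0 - PySem.List.pyGetD index_quota1 0 0 ≠ 1 ∧
      PySem.List.pyGetD index_quota1 3 0 - PySem.List.pyGetD index_quota1 2 0 ≠ 1 then 4
  else 0

-- ===== PORT B =====
def has_constant_alt (str : String) : Int :=
  -- the separator "\"" is nonempty, so Python's split always returns (split? = some); getD's default is dead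
  match (PySem.Str.split? str "\"").getD [] with
  | [_, p1, _] => if p1 ≠ "" then 2 else 0
  | [_, p1, _, p3, _] => if p1 ≠ "" ∧ p3 ≠ "" then 4 else 0
  | _ => 0

-- ===== PRECONDITION & SPEC =====
def Spec_has_constant (str : String) (out : Int) : Prop := out = has_constant_alt str
instance (str : String) (out : Int) : Decidable (Spec_has_constant str out) := by unfold Spec_has_constant; infer_instance

-- ===== CLAIM (what is proved, stated in full; the proofs are below) =====
def Claim_equal_has_constant : Prop := ∀ (str : String), Dom_has_constant str → Spec_has_constant str (has_constant str)

-- ===== LEMMAS AND PROOFS =====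

/-- Structural split on the quote character. -/
def pvSp : List Char → List (List Char)
  | [] => [[]]
  | c :: t =>
    if c = '"' then [] :: pvSp t
    else
      match pvSp t with
      | [] => [[c]]        -- unreachable: pvSp is never []
      | p :: ps => (c :: p) :: ps

/-- Positions of the quotes, read off the parts. -/
def pvOffs : List (List Char) → List Int
  | [] => []
  | [_] => []
  | p :: q :: ps => (p.length : Int) :: (pvOffs (q :: ps)).map (· + ((p.length : Int) + 1))

theorem pvSp_ne_nil (l : List Char) : pvSp l ≠ [] := by
  cases l with
  | nil => simp [pvSp]
  | cons c t =>
    simp only [pvSp]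
    split
    · simp
    · split
      · simp
      · simp

def pvGlue (pre : List Char) : List (List Char) → List (List Char)
  | [] => [pre]
  | p :: ps => (pre ++ p) :: ps

theorem pv_go_spec (fuel : Nat) : ∀ (l cur : List Char) (acc : List (List Char)),
    l.length ≤ fuel →
    PySem.Chars.splitOn.go ['"'] fuel l cur acc = acc.reverse ++ pvGlue cur.reverse (pvSp l) := by
  induction fuel with
  | zero =>
    intro l cur acc h
    have : l = [] := by cases l <;> simp_all
    subst this
    simp [PySem.Chars.splitOn.go, pvSp, pvGlue]
  | succ n ih =>
    intro l cur acc h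
    cases l with
    | nil => simp [PySem.Chars.splitOn.go, pvSp, pvGlue]
    | cons c rest =>
      by_cases hc : c = '"'
      · subst hc
        have hpre : List.isPrefixOf ['"'] ('"' :: rest) = true := by
          simp [List.isPrefixOf]
        rw [PySem.Chars.splitOn.go]
        simp only [hpre, if_pos, List.length_cons, List.length_nil, List.drop_succ_cons, List.drop_zero]
        rw [ih rest [] ((cur.reverse) :: acc) (by simpa using h)]
        cases hsp : pvSp rest with
        | nil => exact absurd hsp (pvSp_ne_nil rest)
        | cons p ps => simp [pvSp, pvGlue, hsp]
      · have hpre : List.isPrefixOf ['"'] (c :: rest) = false := by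
          simp [List.isPrefixOf, BEq.beq]
          intro h'; exact absurd h'.symm hc
        rw [PySem.Chars.splitOn.go]
        simp only [hpre, Bool.false_eq_true, if_false]
        rw [ih rest (c :: cur) acc (by simpa using h)]
        cases hsp : pvSp rest with
        | nil => exact absurd hsp (pvSp_ne_nil rest)
        | cons p ps => simp [pvSp, pvGlue, hsp, hc]

theorem pv_splitOn_eq (cs : List Char) : PySem.Chars.splitOn cs ['"'] = pvSp cs := by
  unfold PySem.Chars.splitOn
  rw [pv_go_spec (cs.length + 1) cs [] [] (by omega)]
  cases hsp : pvSp cs with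
  | nil => exact absurd hsp (pvSp_ne_nil cs)
  | cons p ps => simp [pvGlue]

theorem pvOffs_length : ∀ (ps : List (List Char)), (pvOffs ps).length = ps.length - 1
  | [] => by simp [pvOffs]
  | [p] => by simp [pvOffs]
  | p :: q :: ps => by simp [pvOffs, pvOffs_length (q :: ps)]

theorem pv_idx_eq (cs : List Char) : ∀ (s : Int),
    ((PySem.List.enumerate cs s).filter (fun p => p.2 == '"')).map (fun p => p.1)
      = (pvOffs (pvSp cs)).map (· + s) := by
  induction cs with
  | nil => intro s; simp [PySem.List.enumerate_nil, pvSp, pvOffs]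
  | cons c t ih =>
    intro s
    rw [PySem.List.enumerate_cons]
    by_cases hc : c = '"'
    · subst hc
      simp only [List.filter_cons, List.map_cons, beq_self_eq_true, if_pos]
      rw [ih (s + 1)]
      cases hsp : pvSp t with
      | nil => exact absurd hsp (pvSp_ne_nil t)
      | cons p ps =>
        have hq : pvSp ('"' :: t) = [] :: p :: ps := by simp [pvSp, hsp]
        rw [hq]
        simp only [pvOffs, List.length_nil, Nat.cast_zero, List.map_cons, List.map_map,
          List.cons.injEq]
        refine ⟨by ring, ?_⟩
        apply List.map_congr_left; intro x _; simp; ring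
    · have hcb : (c == '"') = false := by simp [hc]
      simp only [List.filter_cons, hcb, Bool.false_eq_true, if_false]
      rw [ih (s + 1)]
      cases hsp : pvSp t with
      | nil => exact absurd hsp (pvSp_ne_nil t)
      | cons p ps =>
        have hq : pvSp (c :: t) = (c :: p) :: ps := by simp [pvSp, hsp, hc]
        rw [hq]
        cases ps with
        | nil => simp [pvOffs]
        | cons q ps' =>
          simp only [pvOffs, List.length_cons, List.map_cons, List.map_map, List.cons.injEq]
          refine ⟨by push_cast; ring, ?_⟩
          apply List.map_congr_left; intro x _; simp; ring

theorem pv_parts_eq (str : String) :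
    (PySem.Str.split? str "\"").getD [] = (pvSp str.toList).map String.ofList := by
  have h : ("\"").toList = ['"'] := rfl
  unfold PySem.Str.split?
  simp [PySem.Chars.split?, h, pv_splitOn_eq]

-- ===== VERDICT (by name: the statement is the Claim_ definition above) =====
theorem has_constant_spec : Claim_equal_has_constant := by
  intro str _
  unfold Spec_has_constant has_constant has_constant_alt
  rw [pv_parts_eq, pv_idx_eq str.toList 0]
  cases hsp : pvSp str.toList with
  | nil => exact absurd hsp (pvSp_ne_nil str.toList)
  | cons p0 ps0 =>
    cases ps0 with
    | nil => simp [pvOffs]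
    | cons p1 ps1 =>
      cases ps1 with
      | nil => simp [pvOffs, PySem.List.pyGetD, PySem.List.pyGet?, PySem.List.pyIdx?]
      | cons p2 ps2 =>
        cases ps2 with
        | nil =>
          -- three parts: two quotes
          simp only [pvOffs, List.map_cons, List.map_nil, List.length_cons, List.length_nil]
          simp only [PySem.List.pyGetD, PySem.List.pyGet?, PySem.List.pyIdx?]
          by_cases h1 : p1 = []
          · subst h1; simp
          · have h1' := List.length_pos_of_ne_nil h1
            simp [h1]
            omega
        | cons p3 ps3 =>
          cases ps3 with
          | nil => simp [pvOffs, PySem.List.pyGetD, PySem.List.pyGet?, PySem.List.pyIdx?]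
          | cons p4 ps4 =>
            cases ps4 with
            | nil =>
              -- five parts: four quotes
              simp only [pvOffs, List.map_cons, List.map_nil, List.length_cons, List.length_nil]
              simp only [PySem.List.pyGetD, PySem.List.pyGet?, PySem.List.pyIdx?]
              by_cases h1 : p1 = [] <;> by_cases h3 : p3 = []
              · subst h1; subst h3; simp
              · subst h1; simp
              · subst h3; simp [h1]
              · have h1' := List.length_pos_of_ne_nil h1
                have h3' := List.length_pos_of_ne_nil h3
                simp [h1, h3]
                exact ⟨by omega, by omega⟩
            | cons p5 ps5 =>
              -- six or more parts: five or more quotes, both return 0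
              have hlen : 5 ≤ (pvOffs (p0 :: p1 :: p2 :: p3 :: p4 :: p5 :: ps5)).length := by
                have h := pvOffs_length (p0 :: p1 :: p2 :: p3 :: p4 :: p5 :: ps5)
                simp at h; omega
              have h2 : ((pvOffs (p0 :: p1 :: p2 :: p3 :: p4 :: p5 :: ps5)).map (· + 0)).length ≠ 2 := by
                simp; omega
              have h4 : ((pvOffs (p0 :: p1 :: p2 :: p3 :: p4 :: p5 :: ps5)).map (· + 0)).length ≠ 4 := by
                simp; omega
              simp only [List.map_cons]
              rw [if_neg (by intro h; exact h2 h.1), if_neg (by intro h; exact h4 h.1)]
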